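-- pv_equiv track=rewrite | github.com/AlexKShah/ds | proj2/proj1-v2/proj1/proj2.py | recursive_convert_prefix_to_postfix
-- ===== SOURCE A (Python) =====
-- def is_operator(c: str) -> bool:
--     """
--     Check if character is an operator
--     :param c:
--     :return:
--     """
--     return c in ['+', '-', '*', '/', '^', '$']
--
-- def recursive_convert_prefix_to_postfix(pre: str, index: int = 0) -> (str, int):
--     """
--     Convert prefix expressions to postfix expressions, now with recursion!
--     :param index: integer position in expression
--     :param pre: prefix expression string
--     :return: postfix expression and current end index
--     """
--     # If the end of our expression is longer than the expression, we must be missing an operand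
--     if index >= len(pre):
--         raise ValueError("Too few OPERANDS in the expression: " + str(pre))
--
--     # consider character at the end of current expression
--     char = pre[index]
--
--     if is_operator(char):
--         try:
--             # Recursively find the operands for the operator
--             operand1, index = recursive_convert_prefix_to_postfix(pre, index + 1)
--             operand2, index = recursive_convert_prefix_to_postfix(pre, index)
--         except ValueError as e:
--             # If we can't match up operands for the operator, then we have too few operators
--             raise ValueError("Too few OPERATORS in the expression: " + str(pre))
--
--         # Make a sub expression, recurse back up with the index in a tuple
--         return operand1 + operand2 + char, index
--     else:
--         # operand, recurse back up
--         return char, index + 1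
-- ===== SOURCE B (Python) =====
-- def is_operator(c: str) -> bool:
--     return c in ['+', '-', '*', '/', '^', '$']
--
-- def recursive_convert_prefix_to_postfix(pre: str, index: int = 0) -> (str, int):
--     """Iterative single pass: an explicit stack of pending operators replaces the recursion."""
--     if index >= len(pre):
--         raise ValueError("Too few OPERANDS in the expression: " + str(pre))
--     stack = []  # frames [operator, first_operand_or_None]
--     i = index
--     while True:
--         if i >= len(pre):
--             raise ValueError("Too few OPERATORS in the expression: " + str(pre))
--         c = pre[i]
--         i += 1
--         if is_operator(c):
--             stack.append([c, None])
--             continue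
--         expr = c
--         while stack:
--             top = stack[-1]
--             if top[1] is None:
--                 top[1] = expr
--                 break
--             stack.pop()
--             expr = top[1] + expr + top[0]
--         else:
--             return expr, i
-- ===== Notes on version B (the rewrite author's own statement) =====
-- stated objective: alternative
-- what changed: Replaces A's recursive descent with a single iterative left-to-right pass that keeps an explicit stack of pending operators and combines completed operands bottom-up.
import Mathlib
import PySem

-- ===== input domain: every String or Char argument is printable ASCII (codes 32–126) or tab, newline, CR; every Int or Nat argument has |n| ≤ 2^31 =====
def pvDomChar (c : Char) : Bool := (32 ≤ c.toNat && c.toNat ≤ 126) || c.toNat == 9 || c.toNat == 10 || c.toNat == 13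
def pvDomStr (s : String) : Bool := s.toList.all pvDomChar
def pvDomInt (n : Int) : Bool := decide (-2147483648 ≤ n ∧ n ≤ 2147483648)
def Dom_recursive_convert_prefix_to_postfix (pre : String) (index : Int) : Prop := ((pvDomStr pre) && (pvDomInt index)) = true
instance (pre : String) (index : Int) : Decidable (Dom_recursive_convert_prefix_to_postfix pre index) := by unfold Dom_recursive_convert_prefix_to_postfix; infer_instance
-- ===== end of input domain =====

-- B replaces A's recursive descent by one iterative left-to-right pass with an explicit
-- stack of pending operators (alternative decomposition, same O(n) cost).


-- ===== PORT A =====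
-- is_operator(c)
def pvIsOp (c : Char) : Bool := c == '+' || c == '-' || c == '*' || c == '/' || c == '^' || c == '$'

-- Literal transliteration of A's recursion over List Char; `none` is exactly where the
-- Python raises (ValueError / IndexError).  Python's recursion needs no fuel; here the
-- fuel parameter only funds termination and the top level supplies provably enough.
def pvParseA (s : List Char) (fuel : Nat) (index : Int) : Option (List Char × Int) :=
  match fuel with
  | 0 => none
  | fuel + 1 =>
    if index ≥ (s.length : Int) then none   -- raise "Too few OPERANDS …"
    else
      match PySem.List.pyGet? s index with
      | none => none                        -- IndexError (index < -len)
      | some c =>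
        if pvIsOp c then
          match pvParseA s fuel (index + 1) with
          | none => none                    -- caught, re-raised "Too few OPERATORS …"
          | some (operand1, i1) =>
            match pvParseA s fuel i1 with
            | none => none
            | some (operand2, i2) => some (operand1 ++ operand2 ++ [c], i2)
        else some ([c], index + 1)

def recursive_convert_prefix_to_postfix (pre : String) (index : Int) : String × Int :=
  match pvParseA pre.toList (((pre.toList.length : Int) - index).toNat + 1) index with
  | some (e, i) => (String.ofList e, i)
  | none => ("", 0)      -- Python raises here; excluded by Pre_

-- ===== PORT B =====
-- B's inner `while stack:` loop: pop completed frames, combining; either the expression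
-- is complete with no pending frame (inl: return) or it is attached as the first operand
-- of the nearest pending operator (inr: the new stack).
def pvSettle (stack : List (Char × Option (List Char))) (e : List Char) :
    (List Char) ⊕ (List (Char × Option (List Char))) :=
  match stack with
  | [] => Sum.inl e
  | (op, none) :: rest => Sum.inr ((op, some e) :: rest)
  | (op, some e1) :: rest => pvSettle rest (e1 ++ e ++ [op])

-- B's outer `while True:` loop (its first check is also Source B's initial OPERANDS check,
-- which tests the same condition and likewise yields `none`).
def pvLoopB (s : List Char) (i : Int) (stack : List (Char × Option (List Char))) :
    Option (List Char × Int) :=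
  if _h : i ≥ (s.length : Int) then none     -- raise (OPERANDS on entry / OPERATORS later)
  else
    match PySem.List.pyGet? s i with
    | none => none                           -- IndexError (i < -len)
    | some c =>
      if pvIsOp c then pvLoopB s (i + 1) ((c, none) :: stack)
      else
        match pvSettle stack [c] with
        | Sum.inl e => some (e, i + 1)
        | Sum.inr stack' => pvLoopB s (i + 1) stack'
termination_by ((s.length : Int) - i).toNat
decreasing_by all_goals omega

def recursive_convert_prefix_to_postfix_alt (pre : String) (index : Int) : String × Int :=
  match pvLoopB pre.toList index [] with
  | some (e, i) => (String.ofList e, i)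
  | none => ("", 0)      -- Python raises here; excluded by Pre_

-- ===== PRECONDITION & SPEC =====
-- The characters A reads, in order (positions index, index+1, …; negative positions wrap
-- as in Python).  Inside Pre_ the getD default is never used.
def pvReads (pre : String) (index : Int) : List Char :=
  (PySem.List.pyRange index (pre.toList.length : Int) 1).map
    (fun i => (PySem.List.pyGet? pre.toList i).getD ' ')

def pvBal (cs : List Char) : Int :=
  cs.foldl (fun a c => if pvIsOp c then a - 1 else a + 1) 0

-- Pre_ = exactly the inputs on which the Python A returns normally: the start position is
-- a valid (possibly negative) index and some prefix of the scanned characters contains one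
-- more operand than operators (a complete prefix expression); otherwise A raises.
def Pre_recursive_convert_prefix_to_postfix (pre : String) (index : Int) : Prop :=
  -(pre.toList.length : Int) ≤ index ∧
  ∃ k ∈ List.range (((pre.toList.length : Int) - index).toNat),
    pvBal ((pvReads pre index).take (k + 1)) = 1
instance (pre : String) (index : Int) : Decidable (Pre_recursive_convert_prefix_to_postfix pre index) := by
  unfold Pre_recursive_convert_prefix_to_postfix; infer_instance

def pvWitness_recursive_convert_prefix_to_postfix : String × Int := ("*+ab$c7", 0)

def Spec_recursive_convert_prefix_to_postfix (pre : String) (index : Int) (out : String × Int) : Prop := out = recursive_convert_prefix_to_postfix_alt pre index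
instance (pre : String) (index : Int) (out : String × Int) : Decidable (Spec_recursive_convert_prefix_to_postfix pre index out) := by unfold Spec_recursive_convert_prefix_to_postfix; infer_instance

-- ===== CLAIM (what is proved, stated in full; the proofs are below) =====
def Claim_equal_recursive_convert_prefix_to_postfix : Prop := ∀ (pre : String) (index : Int), Dom_recursive_convert_prefix_to_postfix pre index → Pre_recursive_convert_prefix_to_postfix pre index → Spec_recursive_convert_prefix_to_postfix pre index (recursive_convert_prefix_to_postfix pre index)

-- ===== LEMMAS AND PROOFS =====

-- One-step unfolding of pvParseA at positive fuel.
theorem pvParseA_succ (s : List Char) (f : Nat) (i : Int) :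
    pvParseA s (f + 1) i =
      (if i ≥ (s.length : Int) then none
       else
         match PySem.List.pyGet? s i with
         | none => none
         | some c =>
           if pvIsOp c then
             match pvParseA s f (i + 1) with
             | none => none
             | some (operand1, i1) =>
               match pvParseA s f i1 with
               | none => none
               | some (operand2, i2) => some (operand1 ++ operand2 ++ [c], i2)
           else some ([c], i + 1)) := rfl

-- A successful parse consumes at least one character.
theorem pvParseA_index_le {s : List Char} {f : Nat} {i : Int} {e : List Char} {i' : Int}
    (h : pvParseA s f i = some (e, i')) : i + 1 ≤ i' := by
  induction f generalizing i e i' with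
  | zero => simp [pvParseA] at h
  | succ f ih =>
    rw [pvParseA_succ] at h
    by_cases hi : i ≥ (s.length : Int)
    · rw [if_pos hi] at h; exact absurd h (by simp)
    · rw [if_neg hi] at h
      cases hg : PySem.List.pyGet? s i with
      | none => rw [hg] at h; simp at h
      | some c =>
        simp only [hg] at h
        by_cases hc : pvIsOp c = true
        · simp only [hc, if_true] at h
          cases h1 : pvParseA s f (i + 1) with
          | none => simp only [h1] at h; cases h
          | some p1 =>
            obtain ⟨e1, i1⟩ := p1
            simp only [h1] at h
            cases h2 : pvParseA s f i1 with
            | none => simp only [h2] at h; cases h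
            | some p2 =>
              obtain ⟨e2, i2⟩ := p2
              simp only [h2, Option.some.injEq, Prod.mk.injEq] at h
              have t1 := ih h1
              have t2 := ih h2
              omega
        · rw [if_neg hc] at h
          simp only [Option.some.injEq, Prod.mk.injEq] at h
          omega

-- The key simulation: running B's loop from position i with any pending stack computes
-- A's parse of the expression at i, fed through the pending frames.
theorem pvLoopB_eq_parse (s : List Char) (f : Nat) :
    ∀ (i : Int) (stack : List (Char × Option (List Char))),
      ((s.length : Int) - i).toNat < f →
      pvLoopB s i stack =
        (pvParseA s f i).bind (fun p =>
          match pvSettle stack p.1 with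
          | Sum.inl e => some (e, p.2)
          | Sum.inr stack' => pvLoopB s p.2 stack') := by
  induction f with
  | zero => intro i stack h; omega
  | succ f ih =>
    intro i stack hf
    rw [pvLoopB, pvParseA_succ]
    by_cases hi : i ≥ (s.length : Int)
    · simp [hi]
    · simp only [hi, dite_false, if_false]
      cases hg : PySem.List.pyGet? s i with
      | none => simp
      | some c =>
        by_cases hc : pvIsOp c = true
        · -- operator: push a pending frame
          simp only [hc, if_true]
          rw [ih (i + 1) ((c, none) :: stack) (by omega)]
          cases h1 : pvParseA s f (i + 1) with
          | none => simp
          | some p1 =>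
            obtain ⟨e1, i1⟩ := p1
            have hle1 : i + 2 ≤ i1 := by have := pvParseA_index_le h1; omega
            simp only [Option.bind_some, pvSettle]
            rw [ih i1 ((c, some e1) :: stack) (by omega)]
            cases h2 : pvParseA s f i1 with
            | none => simp
            | some p2 => obtain ⟨e2, i2⟩ := p2; simp [pvSettle]
        · -- operand
          simp [hc]

-- A = B on every input (the ports give the same default on the excluded inputs too).
theorem pvPorts_eq (pre : String) (index : Int) :
    recursive_convert_prefix_to_postfix pre index = recursive_convert_prefix_to_postfix_alt pre index := by
  unfold recursive_convert_prefix_to_postfix recursive_convert_prefix_to_postfix_alt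
  rw [pvLoopB_eq_parse pre.toList (((pre.toList.length : Int) - index).toNat + 1) index []
      (by omega)]
  cases pvParseA pre.toList (((pre.toList.length : Int) - index).toNat + 1) index with
  | none => rfl
  | some p => rfl

-- ===== VERDICT (by name: the statement is the Claim_ definition above) =====
theorem recursive_convert_prefix_to_postfix_spec : Claim_equal_recursive_convert_prefix_to_postfix := by
  intro pre index _ _
  unfold Spec_recursive_convert_prefix_to_postfix
  exact pvPorts_eq pre index
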